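-- pv_equiv track=rewrite | github.com/ChenghaoMou/text-dedup | benchmarks/utils.py | clusters_to_predictions_minhash
-- ===== SOURCE A (Python) =====
-- from collections import defaultdict
--
-- def clusters_to_predictions_minhash(
--     cluster_mapping: dict[int, int], id_to_core_id: dict[int, str]
-- ) -> dict[str, set[str]]:
--     """Convert MinHash cluster mapping to predictions dictionary.
--
--     MinHash produces {document_id: cluster_group_id} where cluster_group_id
--     is an arbitrary identifier, NOT a document ID.
--
--     Parameters
--     ----------
--     cluster_mapping : dict[int, int]
--         Mapping from document index to cluster group ID
--     id_to_core_id : dict[int, str]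
--         Mapping from internal index to core_id
--
--     Returns
--     -------
--     dict[str, set[str]]
--         Mapping from core_id to set of duplicate core_ids
--     """
--     # Group documents by cluster
--     cluster_to_docs: dict[int, set[str]] = defaultdict(set)
--     for doc_idx, cluster_id in cluster_mapping.items():
--         core_id = id_to_core_id.get(doc_idx)
--         if core_id:
--             cluster_to_docs[cluster_id].add(core_id)
--
--     # For each document, find all other documents in the same cluster
--     predictions: dict[str, set[str]] = {}
--     for doc_idx, cluster_id in cluster_mapping.items():
--         core_id = id_to_core_id.get(doc_idx)
--         if core_id:
--             cluster_docs = cluster_to_docs[cluster_id]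
--             predictions[core_id] = cluster_docs - {core_id}
--
--     return predictions
-- ===== SOURCE B (Python) =====
-- def clusters_to_predictions_minhash(
--     cluster_mapping: dict[int, int], id_to_core_id: dict[int, str]
-- ) -> dict[str, set[str]]:
--     """No grouping structure at all: collect the truthy (core_id, cluster_id)
--     pairs once, then compute each prediction set by a direct brute-force scan
--     of all pairs for same-cluster mates."""
--     pairs: list[tuple[str, int]] = []
--     for doc_idx, cluster_id in cluster_mapping.items():
--         core_id = id_to_core_id.get(doc_idx)
--         if core_id:
--             pairs.append((core_id, cluster_id))
--     return {
--         cid: {c for c, cl in pairs if cl == cluster_id and c != cid}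
--         for cid, cluster_id in pairs
--     }
-- ===== Notes on version B (the rewrite author's own statement) =====
-- stated objective: simpler
-- what changed: B drops A's cluster->docs grouping dict entirely: it collects the truthy (core_id, cluster_id) pairs once and computes each prediction set by a direct brute-force scan of all pairs for same-cluster mates, instead of A's two-pass defaultdict grouping.
import Mathlib
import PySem

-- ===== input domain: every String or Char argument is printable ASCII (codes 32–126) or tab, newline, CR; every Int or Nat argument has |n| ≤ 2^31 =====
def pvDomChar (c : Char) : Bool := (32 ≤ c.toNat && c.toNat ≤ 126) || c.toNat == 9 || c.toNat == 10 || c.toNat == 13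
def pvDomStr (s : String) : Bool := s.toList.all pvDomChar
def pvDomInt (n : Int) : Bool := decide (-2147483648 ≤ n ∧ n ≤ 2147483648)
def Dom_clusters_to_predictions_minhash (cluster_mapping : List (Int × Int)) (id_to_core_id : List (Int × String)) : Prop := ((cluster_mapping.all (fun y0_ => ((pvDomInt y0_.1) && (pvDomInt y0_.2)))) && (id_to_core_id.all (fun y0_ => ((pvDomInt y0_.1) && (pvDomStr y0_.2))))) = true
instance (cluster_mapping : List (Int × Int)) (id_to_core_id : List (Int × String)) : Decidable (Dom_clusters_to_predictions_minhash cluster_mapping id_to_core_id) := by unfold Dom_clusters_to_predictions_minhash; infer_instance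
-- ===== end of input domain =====

-- B replaces A's cluster->docs grouping dict with a brute-force scan: collect (core_id, cluster_id) pairs once, then compute each prediction set by scanning all pairs (simpler, no grouping structure; not faster).


-- ===== PORT A =====
-- the dict arguments arrive as assoc lists; Dict.ofList reproduces Python dict construction
def clusters_to_predictions_minhash (cluster_mapping : List (Int × Int)) (id_to_core_id : List (Int × String)) : List (String × List String) :=
  let cmItems := (PySem.Dict.ofList cluster_mapping).items
  let i2c := PySem.Dict.ofList id_to_core_id
  -- first loop: cluster_to_docs = defaultdict(set); add core_id when truthy
  let cluster_to_docs : PySem.Dict Int (PySem.Set String) :=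
    cmItems.foldl (fun d p =>
      match i2c.get? p.1 with
      | some core_id => if core_id ≠ "" then d.modify p.2 PySem.Set.empty (fun s => PySem.Set.add s core_id) else d
      | none => d) PySem.Dict.empty
  -- second loop over cluster_mapping: predictions[core_id] = cluster_docs - {core_id}
  let predictions : PySem.Dict String (List String) :=
    cmItems.foldl (fun d p =>
      match i2c.get? p.1 with
      | some core_id =>
          if core_id ≠ "" then
            d.insert core_id (PySem.Set.diff (cluster_to_docs.getD p.2 PySem.Set.empty) [core_id])
          else d
      | none => d) PySem.Dict.empty
  predictions.items

-- ===== PORT B =====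
def clusters_to_predictions_minhash_alt (cluster_mapping : List (Int × Int)) (id_to_core_id : List (Int × String)) : List (String × List String) :=
  let cmItems := (PySem.Dict.ofList cluster_mapping).items
  let i2c := PySem.Dict.ofList id_to_core_id
  -- pairs loop: append (core_id, cluster_id) when core_id is truthy
  let pairs : List (String × Int) :=
    cmItems.foldl (fun l p =>
      match i2c.get? p.1 with
      | some core_id => if core_id ≠ "" then l ++ [(core_id, p.2)] else l
      | none => l) []
  -- dict comprehension over pairs; the set comprehension scans all pairs
  (pairs.foldl (fun (d : PySem.Dict String (List String)) q =>
      d.insert q.1 (PySem.Set.ofList ((pairs.filter (fun r => r.2 == q.2 && !(r.1 == q.1))).map (·.1))))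
    PySem.Dict.empty).items

-- ===== PRECONDITION & SPEC =====
def Spec_clusters_to_predictions_minhash (cluster_mapping : List (Int × Int)) (id_to_core_id : List (Int × String)) (out : List (String × List String)) : Prop := out = clusters_to_predictions_minhash_alt cluster_mapping id_to_core_id
instance (cluster_mapping : List (Int × Int)) (id_to_core_id : List (Int × String)) (out : List (String × List String)) : Decidable (Spec_clusters_to_predictions_minhash cluster_mapping id_to_core_id out) := by unfold Spec_clusters_to_predictions_minhash; infer_instance

-- ===== CLAIM (what is proved, stated in full; the proofs are below) =====
def Claim_equal_clusters_to_predictions_minhash : Prop := ∀ (cluster_mapping : List (Int × Int)) (id_to_core_id : List (Int × String)), Dom_clusters_to_predictions_minhash cluster_mapping id_to_core_id → Spec_clusters_to_predictions_minhash cluster_mapping id_to_core_id (clusters_to_predictions_minhash cluster_mapping id_to_core_id)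

-- ===== LEMMAS AND PROOFS =====

-- the guarded (core_id truthy) pairs (core_id, cluster_id), in document order
def pvPairs (cmItems : List (Int × Int)) (i2c : PySem.Dict Int String) : List (String × Int) :=
  cmItems.filterMap (fun p =>
    match i2c.get? p.1 with
    | some core_id => if core_id ≠ "" then some (core_id, p.2) else none
    | none => none)

-- any fold with the get?/truthiness guard is a fold over pvPairs
theorem pvFold_eq_fold_pairs {σ : Type} (cmItems : List (Int × Int)) (i2c : PySem.Dict Int String)
    (g : σ → String × Int → σ) (init : σ) :
    cmItems.foldl (fun s p =>
      match i2c.get? p.1 with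
      | some core_id => if core_id ≠ "" then g s (core_id, p.2) else s
      | none => s) init
      = (pvPairs cmItems i2c).foldl g init := by
  induction cmItems generalizing init with
  | nil => rfl
  | cons p t ih =>
      cases h : i2c.get? p.1 with
      | none =>
          simp only [pvPairs, List.filterMap_cons, List.foldl_cons, h]
          exact ih _
      | some c =>
          by_cases hc : c ≠ ""
          · simp only [pvPairs, List.filterMap_cons, List.foldl_cons, h, if_pos hc]
            exact ih _
          · simp only [pvPairs, List.filterMap_cons, List.foldl_cons, h, if_neg hc]
            exact ih _

-- appending one-by-one builds the list itself
theorem pvFoldl_append (l : List (String × Int)) (a : List (String × Int)) :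
    l.foldl (fun acc q => acc ++ [q]) a = a ++ l := by
  induction l generalizing a with
  | nil => simp
  | cons q t ih => simp [ih]

-- A's grouping fold, read off at one cluster, is the filtered core_id list as a set
theorem pvGroups_eq (l : List (String × Int)) (c : Int) :
    (l.foldl (fun d q => d.modify q.2 PySem.Set.empty (fun s => PySem.Set.add s q.1)) PySem.Dict.empty).getD c PySem.Set.empty
      = PySem.Set.ofList ((l.filter (fun r => r.2 == c)).map (·.1)) := by
  induction l using List.reverseRecOn with
  | nil => rfl
  | append_singleton t q ih =>
      simp only [List.foldl_append, List.foldl_cons, List.foldl_nil, List.filter_append,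
        List.filter_cons, List.filter_nil, List.map_append]
      by_cases hc : c = q.2
      · subst hc
        rw [PySem.Dict.getD_modify_self, ih]
        simp [PySem.Set.ofList_append_singleton]
      · rw [PySem.Dict.getD_modify_of_ne _ _ _ hc, ih]
        have : (q.2 == c) = false := by simp; exact fun h => hc h.symm
        simp [this]

-- set(…) commutes with filtering the generating list
theorem pvOfList_filter (p : String → Bool) (L : List String) :
    PySem.Set.ofList (L.filter p) = (PySem.Set.ofList L).filter p := by
  induction L using List.reverseRecOn with
  | nil => rfl
  | append_singleton t x ih =>
      rw [List.filter_append, PySem.Set.ofList_append_singleton, PySem.Set.add_eq_ite]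
      by_cases hp : p x = true
      · rw [List.filter_cons, if_pos hp, List.filter_nil, PySem.Set.ofList_append_singleton, ih,
            PySem.Set.add_eq_ite]
        by_cases hm : x ∈ PySem.Set.ofList t
        · rw [if_pos (by simp [List.mem_filter, hm, hp]), if_pos hm]
        · rw [if_neg (by simp [List.mem_filter, hm]), if_neg hm, List.filter_append,
              List.filter_cons, if_pos hp, List.filter_nil]
      · rw [List.filter_cons, if_neg hp, List.filter_nil, List.append_nil, ih]
        by_cases hm : x ∈ PySem.Set.ofList t
        · rw [if_pos hm]
        · rw [if_neg hm, List.filter_append, List.filter_cons, if_neg hp, List.filter_nil,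
              List.append_nil]

-- Python's s - {x} is a filter on s's element list
theorem pvDiff_singleton (s : PySem.Set String) (x : String) :
    PySem.Set.diff s [x] = s.filter (fun y => !(y == x)) := by
  unfold PySem.Set.diff
  congr 1
  funext y
  rw [Bool.eq_iff_iff]
  simp

theorem clusters_eq (cluster_mapping : List (Int × Int)) (id_to_core_id : List (Int × String)) :
    clusters_to_predictions_minhash cluster_mapping id_to_core_id
      = clusters_to_predictions_minhash_alt cluster_mapping id_to_core_id := by
  simp only [clusters_to_predictions_minhash, clusters_to_predictions_minhash_alt]
  rw [pvFold_eq_fold_pairs (g := fun (d : PySem.Dict Int (PySem.Set String)) q =>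
        d.modify q.2 PySem.Set.empty (fun s => PySem.Set.add s q.1)),
      pvFold_eq_fold_pairs (g := fun (l : List (String × Int)) q => l ++ [q]), pvFoldl_append,
      List.nil_append]
  set pairs := pvPairs (PySem.Dict.ofList cluster_mapping).items (PySem.Dict.ofList id_to_core_id) with hp
  rw [pvFold_eq_fold_pairs (g := fun (d : PySem.Dict String (List String)) q =>
        d.insert q.1 (PySem.Set.diff
          ((pairs.foldl (fun d q => d.modify q.2 PySem.Set.empty (fun s => PySem.Set.add s q.1))
              PySem.Dict.empty).getD q.2 PySem.Set.empty) [q.1]))]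
  congr 1
  apply PySem.List.foldl_congr_mem
  intro d q _
  rw [pvGroups_eq]
  congr 1
  rw [pvDiff_singleton, ← pvOfList_filter, List.filter_map, List.filter_filter]
  refine congrArg _ (congrArg _ (List.filter_congr ?_))
  intro r _
  simp [Function.comp, Bool.and_comm]

-- ===== VERDICT (by name: the statement is the Claim_ definition above) =====
theorem clusters_to_predictions_minhash_spec : Claim_equal_clusters_to_predictions_minhash := by
  intro cm i2c _
  unfold Spec_clusters_to_predictions_minhash
  exact clusters_eq cm i2c
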